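-- pv_equiv track=rewrite | github.com/gitpNser/learndata | gus.py | Gus
-- ===== SOURCE A (Python) =====
-- import math
--
-- def prime(x):
--
--     if x==1:
--         return False
--     j = int(math.sqrt(x))
--     for i in range(2,j+1):
--         if x%i == 0:
--             return False
--
--     return True
--
-- def Gus(n):
--     k=3
--     while k < n:
--         t = n-k
--         if t < k:
--             break
--         if prime(t) and prime(k):
--             return k, t
--         k += 2
-- ===== SOURCE B (Python) =====
-- import math
--
-- def _primes_upto(r):
--     sieve = [True] * (r + 1)
--     sieve[0] = sieve[1] = False
--     for i in range(2, r + 1):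
--         if sieve[i]:
--             for j in range(i * i, r + 1, i):
--                 sieve[j] = False
--     return [i for i in range(2, r + 1) if sieve[i]]
--
-- def _has_no_factor(x, primes):
--     for p in primes:
--         if p * p > x:
--             break
--         if x % p == 0:
--             return False
--     return True
--
-- def Gus(n):
--     if n < 6:
--         return None
--     primes = _primes_upto(math.isqrt(n - 3))
--     for k in range(3, n // 2 + 1, 2):
--         t = n - k
--         if _has_no_factor(t, primes) and _has_no_factor(k, primes):
--             return k, t
--     return None
-- ===== Notes on version B (the rewrite author's own statement) =====
-- stated objective: alternative
-- what changed: B sieves the primes up to the integer square root of the largest value to be tested once (Sieve of Eratosthenes) and then scans the odd candidates in ascending order, testing each candidate k and its complement n-k by dividing only by those precomputed primes, instead of A's per-candidate trial division over all integers up to the square root.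
import Mathlib
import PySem

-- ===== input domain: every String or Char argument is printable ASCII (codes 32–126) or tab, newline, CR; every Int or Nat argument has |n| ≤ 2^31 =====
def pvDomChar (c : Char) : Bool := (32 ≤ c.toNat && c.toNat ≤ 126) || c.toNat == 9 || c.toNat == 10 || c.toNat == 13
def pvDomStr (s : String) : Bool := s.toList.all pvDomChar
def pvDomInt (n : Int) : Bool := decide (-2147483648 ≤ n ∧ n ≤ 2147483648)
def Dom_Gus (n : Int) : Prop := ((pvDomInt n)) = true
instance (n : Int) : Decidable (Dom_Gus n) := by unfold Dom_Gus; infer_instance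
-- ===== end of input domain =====

-- B replaces A's per-candidate trial division over all integers up to sqrt by one sieve of the
-- primes up to isqrt(n-3), then a scan of the odd candidates dividing only by those primes (alternative algorithm).

-- ===== PORT A =====
-- prime(x): 'int(math.sqrt(x))' is ported as Nat.sqrt x.toNat — exact for the
-- 0 ≤ x ≤ 2^31 arguments this program passes (double sqrt rounds to the true isqrt there).
def primeA (x : Int) : Bool :=
  if x = 1 then false
  else
    -- for i in range(2, j+1): if x % i == 0: return False / return True
    (PySem.List.pyRange 2 ((Nat.sqrt x.toNat : Int) + 1) 1).all
      (fun i => !(PySem.Int.mod x i = 0))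

-- the 'while k < n' loop of Gus
def gusLoop (n k : Int) : Option (Int × Int) :=
  if _h : k < n then
    let t := n - k
    if t < k then none
    else if primeA t && primeA k then some (k, t)
    else gusLoop n (k + 2)
  else none
termination_by (n - k).toNat
decreasing_by omega

def Gus (n : Int) : Option (Int × Int) := gusLoop n 3

-- ===== PORT B =====
-- _primes_upto(r)'s inner loop: for j in range(i*i, r+1, i): sieve[j] = False   (here n = r+1)
def sieveMark (s : List Bool) (n i : Int) : List Bool :=
  (PySem.List.pyRange (i * i) n i).foldl (fun s j => PySem.List.pySetD s j false) s

-- _primes_upto(r)'s sieve list after both loops (n = r+1 is its length)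
def sieveOf (n : Int) : List Bool :=
  (PySem.List.pyRange 2 n 1).foldl
    (fun s i => if PySem.List.pyGetD s i false then sieveMark s n i else s)
    (PySem.List.pySetD (PySem.List.pySetD (List.replicate n.toNat true) 0 false) 1 false)

-- _primes_upto(r)'s final comprehension [i for i in range(2, r+1) if sieve[i]]
def primesUpto (r : Int) : List Int :=
  (PySem.List.pyRange 2 (r + 1) 1).filter (fun i => PySem.List.pyGetD (sieveOf (r + 1)) i false)

-- _has_no_factor(x, primes): loop with break / early return
def isPrimeL (x : Int) : List Int → Bool
  | [] => true
  | p :: ps =>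
    if p * p > x then true
    else if PySem.Int.mod x p = 0 then false
    else isPrimeL x ps

-- math.isqrt(n-3) is ported as Nat.sqrt (n-3).toNat (exact); the scan is find? over range(3, n//2+1, 2)
def Gus_alt (n : Int) : Option (Int × Int) :=
  if n < 6 then none
  else
    let primes := primesUpto ((Nat.sqrt (n - 3).toNat : Int))
    ((PySem.List.pyRange 3 (PySem.Int.floordiv n 2 + 1) 2).find?
        (fun k => isPrimeL (n - k) primes && isPrimeL k primes)).map
      (fun k => (k, n - k))

-- ===== PRECONDITION & SPEC =====
def Spec_Gus (n : Int) (out : Option (Int × Int)) : Prop := out = Gus_alt n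
instance (n : Int) (out : Option (Int × Int)) : Decidable (Spec_Gus n out) := by unfold Spec_Gus; infer_instance

-- ===== CLAIM (what is proved, stated in full; the proofs are below) =====
def Claim_equal_Gus : Prop := ∀ (n : Int), Dom_Gus n → Spec_Gus n (Gus n)

-- ===== LEMMAS AND PROOFS =====

-- a number ≥ 2 is prime iff it has no prime factor p with p*p ≤ it
lemma prime_iff_no_small_prime_factor (m : Nat) (h2 : 2 ≤ m) :
    Nat.Prime m ↔ ∀ p : Nat, Nat.Prime p → p * p ≤ m → ¬ p ∣ m := by
  constructor
  · intro hm p hp hpp hdvd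
    rcases (Nat.Prime.eq_one_or_self_of_dvd hm p hdvd) with h1 | h1
    · exact hp.one_lt.ne' h1
    · subst h1; nlinarith [hp.two_le]
  · intro h
    by_contra hnp
    have hp := Nat.minFac_prime (by omega : m ≠ 1)
    have hsq := Nat.minFac_sq_le_self (by omega : 0 < m) hnp
    exact h m.minFac hp (by nlinarith [sq_nonneg m.minFac, hsq, Nat.pow_two m.minFac ▸ hsq]) (Nat.minFac_dvd m)

-- A's trial division decides primality
lemma primeA_eq (x : Int) (h : 2 ≤ x) : primeA x = decide (Nat.Prime x.toNat) := by
  have hx : ((x.toNat : Int)) = x := Int.toNat_of_nonneg (by omega)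
  rw [primeA, if_neg (by omega)]
  rw [Bool.eq_iff_iff]
  simp only [List.all_eq_true, PySem.List.mem_pyRange_one, decide_eq_true_eq,
    Bool.not_eq_eq_eq_not, Bool.not_true, decide_eq_false_iff_not, PySem.Int.mod_eq_zero_iff_dvd]
  rw [Nat.prime_def_le_sqrt]
  constructor
  · intro hall
    refine ⟨by omega, fun q hq hqs hdvd => ?_⟩
    have := hall (q : Int) ⟨by omega, by omega⟩
    exact this (by rw [← hx]; exact_mod_cast hdvd)
  · rintro ⟨-, hall⟩ i ⟨hi2, hile⟩ hdvd
    have hit : (i.toNat : Int) = i := Int.toNat_of_nonneg (by omega)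
    exact hall i.toNat (by omega) (by omega) (Int.ofNat_dvd.mp (by rw [hit, hx]; exact hdvd))

-- step-2 range induction helpers
lemma pyRange_two_nil (a b : Int) (h : b ≤ a) : PySem.List.pyRange a b 2 = [] := by
  rw [PySem.List.pyRange_of_pos a b (by omega)]
  rw [if_neg (by omega)]
  simp

lemma pyRange_two_cons (a b : Int) (h : a < b) :
    PySem.List.pyRange a b 2 = a :: PySem.List.pyRange (a + 2) b 2 := by
  rw [PySem.List.pyRange_of_pos a b (by omega), PySem.List.pyRange_of_pos (a+2) b (by omega)]
  rw [if_pos h]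
  by_cases h2 : a + 2 < b
  · rw [if_pos h2]
    have he : ((b - a + 2 - 1) / 2).toNat = ((b - (a+2) + 2 - 1) / 2).toNat + 1 := by omega
    rw [he, List.range_succ_eq_map]
    simp only [List.map_cons, List.map_map]
    congr 1
    · simp
    · apply List.map_congr_left
      intro k _
      simp [Function.comp, Nat.succ_eq_add_one]
      ring
  · rw [if_neg h2]
    have he : ((b - a + 2 - 1) / 2).toNat = 1 := by omega
    rw [he]
    simp

-- folding set-false over a list of in-range indices
lemma foldl_setFalse_length (js : List Int) (s : List Bool) :
    (js.foldl (fun s j => PySem.List.pySetD s j false) s).length = s.length := by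
  induction js generalizing s with
  | nil => rfl
  | cons j js ih => simp [List.foldl_cons, ih, PySem.List.length_pySetD]

lemma foldl_setFalse_getD (js : List Int) (s : List Bool) (m : Nat)
    (hjs : ∀ j ∈ js, 0 ≤ j) :
    (js.foldl (fun s j => PySem.List.pySetD s j false) s).getD m false
      = if ∃ j ∈ js, j.toNat = m then false else s.getD m false := by
  induction js generalizing s with
  | nil => simp
  | cons j js ih =>
    rw [List.foldl_cons, PySem.List.pySetD_of_nonneg s false (hjs j (by simp))]
    rw [ih _ (fun j hj => hjs j (by simp [hj]))]
    by_cases hmem : ∃ j' ∈ js, j'.toNat = m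
    · rw [if_pos hmem, if_pos (by rcases hmem with ⟨j', h1, h2⟩; exact ⟨j', by simp [h1], h2⟩)]
    · rw [if_neg hmem]
      by_cases hjm : j.toNat = m
      · rw [if_pos ⟨j, by simp, hjm⟩]
        subst hjm
        by_cases hlt : j.toNat < s.length
        · simp [List.getD, hlt]
        · rw [List.set_eq_of_length_le (by omega)]
          rw [List.getD_eq_default _ _ (by omega)]
      · rw [if_neg (by rintro ⟨j', hj', he⟩; rcases List.mem_cons.mp hj' with rfl | hj'; exact hjm he; exact hmem ⟨j', hj', he⟩)]
        simp [List.getD, hjm]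

-- characterisation of one marking pass
lemma sieveMark_getD (s : List Bool) (n i : Int) (hi : 2 ≤ i) (hlen : s.length = n.toNat)
    (m : Nat) (hm : m < n.toNat) :
    (sieveMark s n i).getD m false
      = if i.toNat ∣ m ∧ i.toNat * i.toNat ≤ m then false else s.getD m false := by
  rw [sieveMark, foldl_setFalse_getD _ _ _
    (fun j hj => by
      have := (PySem.List.mem_pyRange_iff_of_pos (by omega : (0:Int) < i) j).mp hj
      nlinarith [this.1])]
  congr 1
  rw [eq_iff_iff]
  have hii : ((i.toNat * i.toNat : Nat) : Int) = i * i := by push_cast; rw [Int.toNat_of_nonneg (by omega)]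
  constructor
  · rintro ⟨j, hj, rfl⟩
    have hmem := (PySem.List.mem_pyRange_iff_of_pos (by omega : (0:Int) < i) j).mp hj
    have hj0 : 0 ≤ j := by nlinarith [hmem.1]
    have hjm : (j.toNat : Int) = j := Int.toNat_of_nonneg hj0
    have hdvd : i ∣ j := by
      have h2 : i ∣ i * i := ⟨i, rfl⟩
      simpa using dvd_add hmem.2.2 h2
    constructor
    · have : (i.toNat : Int) ∣ (j.toNat : Int) := by rw [hjm, Int.toNat_of_nonneg (by omega : (0:Int) ≤ i)]; exact hdvd
      exact_mod_cast this
    · have := hmem.1; omega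
  · rintro ⟨hdvd, hle⟩
    refine ⟨(m : Int), ?_, by simp⟩
    rw [PySem.List.mem_pyRange_iff_of_pos (by omega : (0:Int) < i)]
    have hdvd' : i ∣ (m : Int) := by
      have : (i.toNat : Int) ∣ (m : Int) := Int.ofNat_dvd.mpr hdvd
      rwa [Int.toNat_of_nonneg (by omega : (0:Int) ≤ i)] at this
    refine ⟨by omega, by omega, ?_⟩
    exact Int.dvd_sub hdvd' ⟨i, rfl⟩

lemma sieveMark_length (s : List Bool) (n i : Int) :
    (sieveMark s n i).length = s.length := foldl_setFalse_length _ _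

-- the sieve invariant
def SieveInv (n i0 : Int) (s : List Bool) : Prop :=
  s.length = n.toNat ∧ ∀ m : Nat, m < n.toNat →
    (s.getD m false = true ↔
      2 ≤ m ∧ ∀ p : Nat, Nat.Prime p → (p : Int) < i0 → p * p ≤ m → ¬ p ∣ m)

lemma sieveInv_init (n : Int) (h : 2 ≤ n) :
    SieveInv n 2
      (PySem.List.pySetD (PySem.List.pySetD (List.replicate n.toNat true) 0 false) 1 false) := by
  rw [PySem.List.pySetD_of_nonneg _ _ (by norm_num), PySem.List.pySetD_of_nonneg _ _ (by norm_num)]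
  constructor
  · simp
  · intro m hm
    have hget : (((List.replicate n.toNat true).set (0:Int).toNat false).set (1:Int).toNat false).getD m false
        = if m = 0 ∨ m = 1 then false else true := by
      simp only [List.getD, List.getElem?_set, List.getElem?_replicate]
      split_ifs <;> simp_all <;> omega
    rw [hget]
    by_cases h01 : m = 0 ∨ m = 1
    · rw [if_pos h01]
      simp only [Bool.false_eq_true, false_iff]
      rintro ⟨hm2, -⟩
      omega
    · rw [if_neg h01]
      simp only [true_iff]
      refine ⟨by omega, fun p hp hlt => absurd hlt (by have := hp.two_le; push_cast; omega)⟩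

lemma sieveInv_read (n i0 : Int) (s : List Bool) (inv : SieveInv n i0 s)
    (h2 : 2 ≤ i0) (hn : i0 < n) :
    (s.getD i0.toNat false = true) ↔ Nat.Prime i0.toNat := by
  have hm : i0.toNat < n.toNat := by omega
  rw [inv.2 i0.toNat hm]
  rw [prime_iff_no_small_prime_factor i0.toNat (by omega)]
  constructor
  · rintro ⟨-, hall⟩ p hp hpp hdvd
    have h1 : p < p * p := by nlinarith [hp.two_le]
    exact hall p hp (by omega) hpp hdvd
  · intro hall
    exact ⟨by omega, fun p hp _ hpp hdvd => hall p hp hpp hdvd⟩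

lemma sieveInv_step (n i0 : Int) (s : List Bool) (inv : SieveInv n i0 s)
    (h2 : 2 ≤ i0) (hn : i0 < n) :
    SieveInv n (i0 + 1)
      (if PySem.List.pyGetD s i0 false then sieveMark s n i0 else s) := by
  have hl : i0.toNat < s.length := by rw [inv.1]; omega
  have hget : PySem.List.pyGetD s i0 false = s.getD i0.toNat false := by
    rw [PySem.List.pyGetD_eq_getElem s false (by omega) (by push_cast; omega),
      List.getD_eq_getElem s false hl]
  by_cases hv : s.getD i0.toNat false = true
  · rw [if_pos (by rw [hget]; exact hv)]
    have hprime : Nat.Prime i0.toNat := (sieveInv_read n i0 s inv h2 hn).mp hv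
    refine ⟨by rw [sieveMark_length]; exact inv.1, fun m hm => ?_⟩
    rw [sieveMark_getD s n i0 h2 inv.1 m hm]
    by_cases hc : i0.toNat ∣ m ∧ i0.toNat * i0.toNat ≤ m
    · rw [if_pos hc]
      simp only [Bool.false_eq_true, false_iff]
      rintro ⟨hm2, hall⟩
      exact hall i0.toNat hprime (by omega) hc.2 hc.1
    · rw [if_neg hc]
      rw [inv.2 m hm]
      constructor
      · rintro ⟨hm2, hall⟩
        refine ⟨hm2, fun p hp hlt hpp hdvd => ?_⟩
        by_cases hpi : p = i0.toNat
        · subst hpi; exact hc ⟨hdvd, hpp⟩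
        · exact hall p hp (by omega) hpp hdvd
      · rintro ⟨hm2, hall⟩
        exact ⟨hm2, fun p hp hlt => hall p hp (by omega)⟩
  · rw [if_neg (by rw [hget]; exact hv)]
    refine ⟨inv.1, fun m hm => ?_⟩
    rw [inv.2 m hm]
    have hnp : ¬ Nat.Prime i0.toNat := fun hp => hv ((sieveInv_read n i0 s inv h2 hn).mpr hp)
    constructor
    · rintro ⟨hm2, hall⟩
      refine ⟨hm2, fun p hp hlt => ?_⟩
      by_cases hpi : p = i0.toNat
      · exact absurd (hpi ▸ hp) hnp
      · exact hall p hp (by omega)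
    · rintro ⟨hm2, hall⟩
      exact ⟨hm2, fun p hp hlt => hall p hp (by omega)⟩

lemma sieveInv_fold (n : Int) (h2 : 2 ≤ n) :
    ∀ (i0 : Int) (s : List Bool), 2 ≤ i0 → i0 ≤ n → SieveInv n i0 s →
      SieveInv n n ((PySem.List.pyRange i0 n 1).foldl
        (fun s i => if PySem.List.pyGetD s i false then sieveMark s n i else s) s) := by
  intro i0
  induction hfuel : (n - i0).toNat generalizing i0 with
  | zero =>
    intro s hi2 hin inv
    have : i0 = n := by omega
    subst this
    rw [PySem.List.pyRange_one_eq_nil (le_refl _)]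
    exact inv
  | succ f ih =>
    intro s hi2 hin inv
    have hlt : i0 < n := by omega
    rw [PySem.List.pyRange_one_cons hlt, List.foldl_cons]
    exact ih (i0 + 1) (by omega) _ (by omega) (by omega) (sieveInv_step n i0 s inv hi2 hlt)

lemma sieveOf_getD (n : Int) (h2 : 2 ≤ n) (m : Nat) (hm : m < n.toNat) :
    (sieveOf n).getD m false = decide (Nat.Prime m) := by
  have inv := sieveInv_fold n h2 2 _ (le_refl _) h2 (sieveInv_init n h2)
  rw [Bool.eq_iff_iff, decide_eq_true_eq, sieveOf, inv.2 m hm]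
  by_cases hm2 : 2 ≤ m
  · rw [prime_iff_no_small_prime_factor m hm2]
    constructor
    · rintro ⟨-, hall⟩ p hp hpp hdvd
      have h1 : p < p * p := by nlinarith [hp.two_le]
      exact hall p hp (by omega) hpp hdvd
    · intro hall
      exact ⟨hm2, fun p hp _ hpp hdvd => hall p hp hpp hdvd⟩
  · constructor
    · rintro ⟨h, -⟩; omega
    · intro hp; exact absurd hp.two_le (by omega)

lemma sieveOf_length (n : Int) (h2 : 2 ≤ n) : (sieveOf n).length = n.toNat := by
  rw [sieveOf]
  exact (sieveInv_fold n h2 2 _ (le_refl _) h2 (sieveInv_init n h2)).1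

lemma sieve_read (n x : Int) (h2 : 2 ≤ n) (hx0 : 0 ≤ x) (hxn : x < n) :
    PySem.List.pyGetD (sieveOf n) x false = decide (Nat.Prime x.toNat) := by
  have hsl := sieveOf_length n h2
  have hl : x.toNat < (sieveOf n).length := by omega
  rw [PySem.List.pyGetD_eq_getElem _ _ hx0 (by push_cast; omega),
    ← List.getD_eq_getElem _ _ hl]
  exact sieveOf_getD n h2 x.toNat (by omega)


-- the scan equivalence

lemma primesUpto_mem (r p : Int) (hr : 1 ≤ r) :
    p ∈ primesUpto r ↔ 2 ≤ p ∧ p ≤ r ∧ Nat.Prime p.toNat := by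
  rw [primesUpto, List.mem_filter, PySem.List.mem_pyRange_one]
  constructor
  · rintro ⟨⟨h2, hlt⟩, hpred⟩
    rw [sieve_read (r+1) p (by omega) (by omega) hlt] at hpred
    exact ⟨h2, by omega, of_decide_eq_true hpred⟩
  · rintro ⟨h2, hle, hp⟩
    refine ⟨⟨h2, by omega⟩, ?_⟩
    rw [sieve_read (r+1) p (by omega) (by omega) (by omega)]
    exact decide_eq_true hp

lemma primesUpto_sorted (r : Int) : (primesUpto r).Pairwise (· < ·) :=
  (PySem.List.pairwise_lt_pyRange_one 2 (r+1)).filter _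

lemma isPrimeL_eq (x : Int) (hx : 2 ≤ x) :
    ∀ ps : List Int, ps.Pairwise (· < ·) → (∀ p ∈ ps, 2 ≤ p) →
      (∀ q : Int, 2 ≤ q → Nat.Prime q.toNat → q * q ≤ x → q ∣ x → q ∈ ps) →
      isPrimeL x ps = decide (Nat.Prime x.toNat) := by
  have hxt : ((x.toNat : Int)) = x := Int.toNat_of_nonneg (by omega)
  intro ps
  induction ps with
  | nil =>
    intro _ _ hcomp
    rw [isPrimeL]
    symm
    rw [decide_eq_true_eq, prime_iff_no_small_prime_factor x.toNat (by omega)]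
    intro p hp hpp hdvd
    have : (p : Int) ∈ ([] : List Int) := by
      refine hcomp p (by exact_mod_cast hp.two_le) (by simpa using hp) ?_ ?_
      · push_cast; omega
      · rw [← hxt]; exact_mod_cast hdvd
    simp at this
  | cons p ps ih =>
    intro hsort hmem hcomp
    rw [isPrimeL]
    have hp2 : 2 ≤ p := hmem p (by simp)
    by_cases hbig : p * p > x
    · rw [if_pos hbig]
      symm
      rw [decide_eq_true_eq, prime_iff_no_small_prime_factor x.toNat (by omega)]
      intro q hq hqq hdvd
      have hqmem : (q : Int) ∈ p :: ps := by
        refine hcomp q (by exact_mod_cast hq.two_le) (by simpa using hq) ?_ ?_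
        · push_cast; omega
        · rw [← hxt]; exact_mod_cast hdvd
      have hqq' : (q : Int) * q ≤ x := by push_cast; omega
      rcases List.mem_cons.mp hqmem with heq | htail
      · rw [← heq] at hbig; omega
      · have hlt : p < (q : Int) := (List.pairwise_cons.mp hsort).1 _ htail
        nlinarith
    · rw [if_neg hbig]
      by_cases hdvd : PySem.Int.mod x p = 0
      · rw [if_pos hdvd]
        rw [PySem.Int.mod_eq_zero_iff_dvd] at hdvd
        symm
        rw [decide_eq_false_iff_not]
        intro hprime
        have hplt : p < x := by nlinarith
        have : p.toNat ∣ x.toNat := by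
          have : (p.toNat : Int) ∣ (x.toNat : Int) := by
            rw [hxt, Int.toNat_of_nonneg (by omega : (0:Int) ≤ p)]; exact hdvd
          exact_mod_cast this
        rcases (Nat.Prime.eq_one_or_self_of_dvd hprime p.toNat this) with h1 | h1 <;> omega
      · rw [if_neg hdvd]
        rw [PySem.Int.mod_eq_zero_iff_dvd] at hdvd
        refine ih (List.pairwise_cons.mp hsort).2 (fun q hq => hmem q (by simp [hq]))
          (fun q hq2 hqp hqq hqdvd => ?_)
        rcases List.mem_cons.mp (hcomp q hq2 hqp hqq hqdvd) with heq | htail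
        · exact absurd (heq ▸ hqdvd) hdvd
        · exact htail

lemma isPrimeL_decides (n x : Int) (h6 : 6 ≤ n) (hx : 2 ≤ x) (hxn : x ≤ n - 3) :
    isPrimeL x (primesUpto ((Nat.sqrt (n - 3).toNat : Int))) = decide (Nat.Prime x.toNat) := by
  have hr : 1 ≤ ((Nat.sqrt (n - 3).toNat : Int)) := by
    have : 0 < Nat.sqrt (n - 3).toNat := Nat.sqrt_pos.mpr (by omega)
    omega
  refine isPrimeL_eq x hx _ (primesUpto_sorted _)
    (fun p hp => ((primesUpto_mem _ p hr).mp hp).1)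
    (fun q hq2 hqp hqq hqdvd => ?_)
  rw [primesUpto_mem _ q hr]
  have hle : q.toNat ≤ Nat.sqrt (n - 3).toNat := by
    have hq0 : (q.toNat : Int) = q := Int.toNat_of_nonneg (by omega)
    have hx0 : (x.toNat : Int) = x := Int.toNat_of_nonneg (by omega)
    have h1 : q.toNat * q.toNat ≤ x.toNat := by
      have : ((q.toNat * q.toNat : Nat) : Int) ≤ ((x.toNat : Nat) : Int) := by
        push_cast
        rw [hq0, hx0]
        exact hqq
      exact_mod_cast this
    have h2 : q.toNat ≤ Nat.sqrt x.toNat := Nat.le_sqrt.mpr (by nlinarith [h1])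
    have h3 : Nat.sqrt x.toNat ≤ Nat.sqrt (n - 3).toNat := Nat.sqrt_le_sqrt (by omega)
    omega
  exact ⟨hq2, by omega, hqp⟩

lemma gusLoop_eq_find (n : Int) (h6 : 6 ≤ n) :
    ∀ (k : Int), 3 ≤ k →
      gusLoop n k
        = ((PySem.List.pyRange k (PySem.Int.floordiv n 2 + 1) 2).find?
            (fun k => isPrimeL (n - k) (primesUpto ((Nat.sqrt (n - 3).toNat : Int)))
              && isPrimeL k (primesUpto ((Nat.sqrt (n - 3).toNat : Int))))).map
          (fun k => (k, n - k)) := by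
  intro k hk3
  rw [PySem.Int.floordiv_eq_ediv_of_pos (by omega : (0:Int) < 2)]
  induction hfuel : (n - k).toNat using Nat.strong_induction_on generalizing k with
  | _ f ih =>
  by_cases hbig : 2 * k ≤ n
  · have hkn : k < n := by omega
    have hkH : k < n / 2 + 1 := by omega
    rw [pyRange_two_cons _ _ hkH, List.find?_cons]
    have epred : (isPrimeL (n - k) (primesUpto ((Nat.sqrt (n - 3).toNat : Int)))
        && isPrimeL k (primesUpto ((Nat.sqrt (n - 3).toNat : Int)))) = (primeA (n - k) && primeA k) := by
      rw [isPrimeL_decides n (n - k) h6 (by omega) (by omega),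
        isPrimeL_decides n k h6 (by omega) (by omega),
        primeA_eq (n - k) (by omega), primeA_eq k (by omega)]
    rw [gusLoop, dif_pos hkn]
    simp only
    rw [if_neg (by omega : ¬ n - k < k)]
    by_cases hp : (primeA (n - k) && primeA k) = true
    · rw [if_pos hp, epred, hp]
      rfl
    · rw [if_neg hp, epred, Bool.eq_false_iff.mpr hp]
      simpa using ih (n - (k + 2)).toNat (by omega) (k + 2) (by omega) rfl
  · rw [pyRange_two_nil _ _ (by omega : n / 2 + 1 ≤ k)]
    rw [gusLoop]
    by_cases hkn : k < n
    · rw [dif_pos hkn]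
      simp only
      rw [if_pos (by omega : n - k < k)]
      rfl
    · rw [dif_neg hkn]
      rfl

-- ===== VERDICT (by name: the statement is the Claim_ definition above) =====
theorem Gus_spec : Claim_equal_Gus := by
  intro n _
  unfold Spec_Gus Gus Gus_alt
  by_cases h : n < 6
  · rw [if_pos h, gusLoop]
    by_cases h3 : 3 < n
    · rw [dif_pos h3]
      simp only
      rw [if_pos (by omega : n - 3 < 3)]
    · rw [dif_neg h3]
  · rw [if_neg h]
    exact gusLoop_eq_find n (by omega) 3 (by omega)
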